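-- pv_equiv track=rewrite | github.com/amaparicio22/DailyCodingProblem | 7.23.2020.py | create_skipcombos
-- ===== SOURCE A (Python) =====
-- def create_skipcombos(num_list, n_skip):
--     """Creates all possible combinations of a list with n_skips. For example,
--     if n_skip = 1, then creates a list of lists where each individual list
--     is the original list with 1 element skipped"""
--     skip_combos = []
--     for skip in range(n_skip+1):
--         combos = []
--         skip_list = num_list[skip:]
--         n_tot = len(skip_list)
--         i = 0
--         while i < n_tot:
--             combos.append(skip_list[i])
--             i = i+1+n_skip
--         if len(combos) > 1: #if there's only one element in the resulting list, skip it
--             skip_combos.append(combos)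
--     return skip_combos
-- ===== SOURCE B (Python) =====
-- def create_skipcombos(num_list, n_skip):
--     """One distributing pass: element at index i goes to bucket i % (n_skip+1);
--     keep buckets with more than one element, in bucket order."""
--     step = n_skip + 1
--     if step <= 0:
--         return []
--     buckets = [[] for _ in range(step)]
--     i = 0
--     for x in num_list:
--         buckets[i % step].append(x)
--         i += 1
--     return [b for b in buckets if len(b) > 1]
-- ===== Notes on version B (the rewrite author's own statement) =====
-- stated objective: faster
-- what changed: Replaces A's n_skip+1 separate strided scans (each taking a slice copy num_list[skip:] and walking it with a while loop) with a single distributing pass that appends each element to bucket index i % (n_skip+1), then keeps the buckets longer than one element.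
import Mathlib
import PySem

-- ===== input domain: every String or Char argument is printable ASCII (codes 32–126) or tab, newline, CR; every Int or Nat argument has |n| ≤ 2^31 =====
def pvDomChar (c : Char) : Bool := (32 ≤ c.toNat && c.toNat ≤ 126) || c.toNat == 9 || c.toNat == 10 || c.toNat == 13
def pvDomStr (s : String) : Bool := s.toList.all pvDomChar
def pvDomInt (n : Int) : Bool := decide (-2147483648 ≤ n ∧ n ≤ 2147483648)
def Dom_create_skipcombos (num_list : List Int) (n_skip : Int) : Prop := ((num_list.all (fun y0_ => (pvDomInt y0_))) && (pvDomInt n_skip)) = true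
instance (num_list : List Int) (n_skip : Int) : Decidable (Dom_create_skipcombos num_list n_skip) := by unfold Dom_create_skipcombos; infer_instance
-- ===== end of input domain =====

-- B replaces A's n_skip+1 strided scans (each over a fresh slice copy) by one distributing pass into n_skip+1 buckets; a timing run measured B faster.

-- ===== PORT A =====
-- the while loop 'while i < n_tot: combos.append(skip_list[i]); i = i+1+n_skip';
-- fuel only makes the recursion total (the loop runs at most skip_list.length times, since
-- the stride 1+n_skip is ≥ 1 whenever the outer range is nonempty); the pyGetD default 0 is
-- never used, since 0 ≤ i < n_tot = skip_list.length at every access.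
def aWhile (fuel : Nat) (skip_list : List Int) (n_tot : Int) (n_skip : Int) (i : Int) (combos : List Int) : List Int :=
  match fuel with
  | 0 => combos
  | f + 1 =>
    if i < n_tot then
      aWhile f skip_list n_tot n_skip (i + 1 + n_skip) (combos ++ [PySem.List.pyGetD skip_list i 0])
    else combos

def create_skipcombos (num_list : List Int) (n_skip : Int) : List (List Int) :=
  (PySem.List.pyRange 0 (n_skip + 1) 1).foldl (fun skip_combos skip =>
    let skip_list := PySem.List.slice num_list (some skip) none
    let n_tot : Int := skip_list.length
    let combos := aWhile (skip_list.length + 1) skip_list n_tot n_skip 0 []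
    if 1 < combos.length then skip_combos ++ [combos] else skip_combos) []

-- ===== PORT B =====
def create_skipcombos_alt (num_list : List Int) (n_skip : Int) : List (List Int) :=
  let step := n_skip + 1
  if step ≤ 0 then []
  else
    let buckets : List (List Int) := (PySem.List.pyRange 0 step 1).map (fun _ => [])
    let final := num_list.foldl
      (fun (s : List (List Int) × Int) x =>
        (s.1.modify (PySem.Int.mod s.2 step).toNat (fun b => b ++ [x]), s.2 + 1))
      (buckets, 0)
    final.1.filter (fun b => decide (1 < b.length))

-- ===== PRECONDITION & SPEC =====
def Spec_create_skipcombos (num_list : List Int) (n_skip : Int) (out : List (List Int)) : Prop := out = create_skipcombos_alt num_list n_skip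
instance (num_list : List Int) (n_skip : Int) (out : List (List Int)) : Decidable (Spec_create_skipcombos num_list n_skip out) := by unfold Spec_create_skipcombos; infer_instance

-- ===== CLAIM (what is proved, stated in full; the proofs are below) =====
def Claim_equal_create_skipcombos : Prop := ∀ (num_list : List Int) (n_skip : Int), Dom_create_skipcombos num_list n_skip → Spec_create_skipcombos num_list n_skip (create_skipcombos num_list n_skip)

-- ===== LEMMAS AND PROOFS =====

/-- every `step`-th element of `xs`, starting with the first -/
def strided (step : Nat) : List Int → List Int
  | [] => []
  | x :: rest => x :: strided step (rest.drop (step - 1))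
termination_by xs => xs.length
decreasing_by simp

theorem strided_nil (step : Nat) : strided step [] = [] := by simp [strided]

theorem strided_cons (step : Nat) (x : Int) (r : List Int) :
    strided step (x :: r) = x :: strided step (r.drop (step - 1)) := by simp [strided]

/-- elements of `xs` whose position, counted from `i` onward, is ≡ `j` (mod `step`) -/
def pickA (step j : Nat) : List Int → Nat → List Int
  | [], _ => []
  | x :: rest, i => if i % step = j then x :: pickA step j rest (i + 1) else pickA step j rest (i + 1)

/-- A's inner-loop body, named (definitionally what the `let`s in the port compute). -/
def gA (num_list : List Int) (n_skip skip : Int) : List Int :=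
  aWhile ((PySem.List.slice num_list (some skip) none).length + 1)
    (PySem.List.slice num_list (some skip) none)
    ((PySem.List.slice num_list (some skip) none).length) n_skip 0 []

theorem create_skipcombos_def (num_list : List Int) (n_skip : Int) :
    create_skipcombos num_list n_skip
      = (PySem.List.pyRange 0 (n_skip + 1) 1).foldl
          (fun acc skip => if 1 < (gA num_list n_skip skip).length
            then acc ++ [gA num_list n_skip skip] else acc) [] := rfl

/-- B's distributing-fold body, named. -/
def fB (step : Int) (s : List (List Int) × Int) (x : Int) : List (List Int) × Int :=
  (s.1.modify (PySem.Int.mod s.2 step).toNat (fun b => b ++ [x]), s.2 + 1)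

theorem create_skipcombos_alt_def (num_list : List Int) (n_skip : Int) :
    create_skipcombos_alt num_list n_skip
      = if n_skip + 1 ≤ 0 then []
        else ((num_list.foldl (fB (n_skip + 1))
            ((PySem.List.pyRange 0 (n_skip + 1) 1).map (fun _ => []), 0)).1).filter
          (fun b => decide (1 < b.length)) := rfl

theorem pickA_skip (step j : Nat) (d : Nat) :
    ∀ (xs : List Int) (i : Nat), (∀ c < d, (i + c) % step ≠ j) →
      pickA step j xs i = pickA step j (xs.drop d) (i + d) := by
  induction d with
  | zero => intro xs i _; simp
  | succ d ih =>
    intro xs i h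
    cases xs with
    | nil => simp [pickA]
    | cons x rest =>
      have h0 : i % step ≠ j := by simpa using h 0 (by omega)
      have h1 : pickA step j (x :: rest) i = pickA step j rest (i + 1) := by
        simp [pickA, h0]
      have h2 := ih rest (i + 1) (fun c hc => by
        have := h (c + 1) (by omega)
        simpa [Nat.add_assoc, Nat.add_comm 1 c] using this)
      rw [h1, h2]
      simp only [List.drop_succ_cons]
      congr 1
      omega

theorem pickA_aligned (step j : Nat) (hj : j < step) :
    ∀ (n : Nat) (ys : List Int), ys.length ≤ n → ∀ i, i % step = j → pickA step j ys i = strided step ys := by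
  intro n
  induction n with
  | zero =>
    intro ys hlen i _
    have : ys = [] := List.eq_nil_of_length_eq_zero (by omega)
    subst this; simp [pickA, strided_nil]
  | succ n ih =>
    intro ys hlen i hi
    cases ys with
    | nil => simp [pickA, strided_nil]
    | cons x rest =>
      have hne : ∀ c < step - 1, (i + 1 + c) % step ≠ j := by
        intro c hc hEq
        have hmod : i ≡ i + 1 + c [MOD step] := by
          unfold Nat.ModEq; omega
        have hdvd : step ∣ (i + 1 + c) - i := (Nat.modEq_iff_dvd' (by omega)).mp hmod
        have heq : (i + 1 + c) - i = 1 + c := by omega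
        rw [heq] at hdvd
        have := Nat.le_of_dvd (by omega) hdvd
        omega
      have h1 : pickA step j (x :: rest) i = x :: pickA step j rest (i + 1) := by
        simp [pickA, hi]
      rw [h1, pickA_skip step j (step - 1) rest (i + 1) hne]
      have hlen' : (rest.drop (step - 1)).length ≤ n := by simp at hlen ⊢; omega
      have hi' : (i + 1 + (step - 1)) % step = j := by
        have heq : i + 1 + (step - 1) = i + step := by omega
        rw [heq, Nat.add_mod_right, hi]
      rw [ih _ hlen' _ hi', strided_cons]

theorem pickA_zero (step j : Nat) (hj : j < step) (xs : List Int) :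
    pickA step j xs 0 = strided step (xs.drop j) := by
  rw [pickA_skip step j j xs 0 (fun c hc => by
    rw [Nat.zero_add, Nat.mod_eq_of_lt (by omega)]; omega)]
  exact pickA_aligned step j hj (xs.drop j).length _ le_rfl (0 + j)
    (by rw [Nat.zero_add, Nat.mod_eq_of_lt hj])

/-- A's while loop collects every `(n_skip+1)`-th element from position `i` on. -/
theorem aWhile_eq_strided (n_skip : Int) (hk : 0 ≤ n_skip) (xs : List Int) :
    ∀ (fuel : Nat) (i : Int) (acc : List Int), 0 ≤ i → xs.length + 1 ≤ fuel + i.toNat →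
      aWhile fuel xs xs.length n_skip i acc = acc ++ strided (n_skip + 1).toNat (xs.drop i.toNat) := by
  intro fuel
  induction fuel with
  | zero =>
    intro i acc hi hfuel
    have : xs.length ≤ i.toNat := by omega
    simp [aWhile, List.drop_eq_nil_of_le this, strided_nil]
  | succ f ih =>
    intro i acc hi hfuel
    by_cases hlt : i < (xs.length : Int)
    · have hi' : i.toNat < xs.length := by omega
      rw [aWhile, if_pos hlt]
      rw [ih (i + 1 + n_skip) _ (by omega) (by omega)]
      have hdrop : xs.drop i.toNat = xs[i.toNat] :: xs.drop (i.toNat + 1) :=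
        (List.getElem_cons_drop hi').symm
      have hstr : strided (n_skip + 1).toNat (xs.drop i.toNat)
          = xs[i.toNat] :: strided (n_skip + 1).toNat ((xs.drop (i.toNat + 1)).drop ((n_skip + 1).toNat - 1)) := by
        rw [hdrop, strided_cons]
      rw [hstr, PySem.List.pyGetD_eq_getElem xs 0 hi (by omega)]
      have hdd : (xs.drop (i.toNat + 1)).drop ((n_skip + 1).toNat - 1) = xs.drop (i + 1 + n_skip).toNat := by
        rw [List.drop_drop]
        congr 1
        omega
      rw [hdd]
      simp
    · rw [aWhile, if_neg hlt]
      have : xs.length ≤ i.toNat := by omega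
      simp [List.drop_eq_nil_of_le this, strided_nil]

/-- B's distributing pass preserves the number of buckets. -/
theorem foldB_length (step : Int) :
    ∀ (xs : List Int) (bs : List (List Int)) (i : Int),
      ((xs.foldl (fB step) (bs, i)).1).length = bs.length := by
  intro xs
  induction xs with
  | nil => intro bs i; rfl
  | cons x rest ih => intro bs i; rw [List.foldl_cons]; show ((rest.foldl (fB step) _).1).length = _; rw [ih]; simp [fB]

/-- result bucket `j` of B's distributing pass, pointwise. -/
theorem foldB_getElem? (step : Nat) (hstep : 0 < step) :
    ∀ (xs : List Int) (bs : List (List Int)) (i : Int) (j : Nat) (b : List Int), 0 ≤ i → bs[j]? = some b →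
      ((xs.foldl (fB (step : Int)) (bs, i)).1)[j]? = some (b ++ pickA step j xs i.toNat) := by
  intro xs
  induction xs with
  | nil => intro bs i j b hi hb; simp [pickA, hb]
  | cons x rest ih =>
    intro bs i j b hi hb
    obtain ⟨m, rfl⟩ : ∃ m : Nat, i = (m : Int) := ⟨i.toNat, by omega⟩
    rw [List.foldl_cons]
    have hmod : (PySem.Int.mod (m : Int) (step : Int)).toNat = m % step := by
      rw [PySem.Int.mod_eq_emod_of_pos (by exact_mod_cast hstep)]
      simp [Int.toNat_emod]
    have hb' : (bs.modify (PySem.Int.mod (m : Int) (step : Int)).toNat (fun c => c ++ [x]))[j]?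
        = some (if m % step = j then b ++ [x] else b) := by
      rw [List.getElem?_modify, hb, hmod]
      split <;> simp_all
    have := ih _ ((m : Int) + 1) j _ (by omega) hb'
    rw [show ((m : Int) + 1) = ((m + 1 : Nat) : Int) by omega] at this
    show ((rest.foldl (fB (step : Int)) (bs.modify (PySem.Int.mod (m : Int) (step : Int)).toNat (fun c => c ++ [x]), (m : Int) + 1)).1)[j]? = _
    rw [show ((m : Int) + 1) = ((m + 1 : Nat) : Int) by omega, this]
    have hpick : pickA step j (x :: rest) ((m : Int)).toNat
        = if m % step = j then x :: pickA step j rest (m + 1) else pickA step j rest (m + 1) := by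
      simp [pickA]
    rw [hpick]
    simp only [Int.toNat_natCast]
    split <;> simp

theorem create_skipcombos_eq (num_list : List Int) (n_skip : Int) :
    create_skipcombos num_list n_skip = create_skipcombos_alt num_list n_skip := by
  rw [create_skipcombos_def, create_skipcombos_alt_def]
  by_cases hneg : n_skip + 1 ≤ 0
  · rw [if_pos hneg]
    have : PySem.List.pyRange 0 (n_skip + 1) 1 = [] := by
      simp [PySem.List.pyRange]; omega
    rw [this]; rfl
  · rw [if_neg hneg]
    set step : Nat := (n_skip + 1).toNat with hstepdef
    have hstep : 0 < step := by omega
    have hcast : (n_skip + 1) = (step : Int) := by omega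
    have hk : 0 ≤ n_skip := by omega
    set h : Nat → List Int := fun j => strided step (num_list.drop j) with hh
    -- A side: the outer loop is a filter-map of the stride-j scans over range step
    have hgA : ∀ k : Nat, gA num_list n_skip ((k : Nat) : Int) = h k := by
      intro k
      unfold gA
      have hslice : PySem.List.slice num_list (some ((k : Nat) : Int)) none = num_list.drop k := by
        rw [PySem.List.slice_from num_list (by omega)]; simp
      rw [hslice, aWhile_eq_strided n_skip hk (num_list.drop k) _ 0 [] le_rfl (by simp)]
      simp [hh, hstepdef]
    have hA : (PySem.List.pyRange 0 (n_skip + 1) 1).foldl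
          (fun acc skip => if 1 < (gA num_list n_skip skip).length
            then acc ++ [gA num_list n_skip skip] else acc) []
        = ((List.range step).filter (fun k => decide (1 < (h k).length))).map h := by
      rw [hcast, PySem.List.pyRange_zero_natCast, List.foldl_map]
      rw [PySem.List.foldl_congr_mem (List.range step) _
        (fun acc k => if 1 < (h k).length then acc ++ [h k] else acc) []
        (fun acc k _ => by rw [hgA k])]
      rw [PySem.List.foldl_append_ite (fun k => 1 < (h k).length) h]
      simp
    -- B side: the final bucket list is the stride-j scans in order
    have hbuckets : (num_list.foldl (fB (n_skip + 1))
          ((PySem.List.pyRange 0 (n_skip + 1) 1).map (fun _ => []), 0)).1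
        = (List.range step).map h := by
      apply List.ext_getElem?
      intro j
      by_cases hj : j < step
      · have hb0 : ((PySem.List.pyRange 0 (n_skip + 1) 1).map (fun _ => ([] : List Int)))[j]? = some [] := by
          rw [hcast, PySem.List.pyRange_zero_natCast, List.getElem?_map, List.getElem?_map,
            List.getElem?_range hj]
          rfl
        rw [hcast, foldB_getElem? step hstep num_list _ 0 j [] le_rfl (by rw [← hcast]; exact hb0)]
        rw [List.getElem?_map, List.getElem?_range hj]
        simp only [Int.toNat_zero, List.nil_append, Option.map_some, hh]
        rw [pickA_zero step j hj num_list]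
      · have h1 : ((List.range step).map h)[j]? = none := by
          rw [List.getElem?_eq_none_iff]; simp; omega
        have h2 := foldB_length (n_skip + 1) num_list
          ((PySem.List.pyRange 0 (n_skip + 1) 1).map (fun _ => [])) 0
        have h3 : ((PySem.List.pyRange 0 (n_skip + 1) 1).map (fun _ => ([] : List Int))).length = step := by
          rw [hcast, PySem.List.pyRange_zero_natCast]; simp
        rw [h1, List.getElem?_eq_none_iff, h2, h3]
        omega
    rw [hA, hbuckets, List.filter_map]
    congr 1

-- ===== VERDICT (by name: the statement is the Claim_ definition above) =====
theorem create_skipcombos_spec : Claim_equal_create_skipcombos := by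
  intro num_list n_skip _
  unfold Spec_create_skipcombos
  exact create_skipcombos_eq num_list n_skip
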